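-- pv_equiv track=rewrite | github.com/peleg-azari/python-projects | ex6 python/ex6_314632019.py | count_subseq
-- ===== SOURCE A (Python) =====
-- def count_subseq(s, subseq, memo=None):
--     if len(subseq) == 0:
--         return 1
--     if len(s) == 0:
--         return 0
--     if memo is None:
--         memo = {}
--     my_key = (len(s), subseq)
--     if my_key not in memo:
--         if s[-1] == subseq[-1]:
--             memo[my_key] = count_subseq(s[:-1], subseq[:-1], memo) + count_subseq(s[:-1], subseq, memo)
--         else:
--             memo[my_key] = count_subseq(s[:-1],subseq, memo)
--     return memo[my_key]
-- ===== SOURCE B (Python) =====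
-- def count_subseq(s, subseq, memo=None):
--     # Bottom-up one-dimensional DP: dp[j] = number of distinct occurrences of
--     # subseq[:j] as a subsequence of the scanned part of s.  The memo
--     # parameter (an internal cache in the recursive original) is unused here;
--     # the caller's dict is left untouched.
--     dp = [1] + [0] * len(subseq)
--     for ch in s:
--         for j in reversed(range(1, len(subseq) + 1)):
--             if ch == subseq[j - 1]:
--                 dp[j] += dp[j - 1]
--     return dp[len(subseq)]
-- ===== Notes on version B (the rewrite author's own statement) =====
-- stated objective: alternative
-- what changed: Replaced the memoized top-down recursion (keyed by (len(s), subseq-prefix), slicing both strings at every call) by a bottom-up one-row index DP scanning s once (O(n*m) work instead of O(n*m*(n+m))); B ignores and never mutates the memo parameter, which is the recursion's own working cache, so Pre_ excludes calls whose memo is pre-seeded with an entry colliding with A's internal cache keys (k in 1..len(s) with a nonempty prefix of subseq), a corner where taking the seeded number on trust (A) and computing the count from the strings (B) are both defensible and no value is specifiable.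
-- outside the precondition, e.g. on count_subseq('ab', 'b', {(1, 'b'): 7}): A returns 8, B returns 1
import Mathlib
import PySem

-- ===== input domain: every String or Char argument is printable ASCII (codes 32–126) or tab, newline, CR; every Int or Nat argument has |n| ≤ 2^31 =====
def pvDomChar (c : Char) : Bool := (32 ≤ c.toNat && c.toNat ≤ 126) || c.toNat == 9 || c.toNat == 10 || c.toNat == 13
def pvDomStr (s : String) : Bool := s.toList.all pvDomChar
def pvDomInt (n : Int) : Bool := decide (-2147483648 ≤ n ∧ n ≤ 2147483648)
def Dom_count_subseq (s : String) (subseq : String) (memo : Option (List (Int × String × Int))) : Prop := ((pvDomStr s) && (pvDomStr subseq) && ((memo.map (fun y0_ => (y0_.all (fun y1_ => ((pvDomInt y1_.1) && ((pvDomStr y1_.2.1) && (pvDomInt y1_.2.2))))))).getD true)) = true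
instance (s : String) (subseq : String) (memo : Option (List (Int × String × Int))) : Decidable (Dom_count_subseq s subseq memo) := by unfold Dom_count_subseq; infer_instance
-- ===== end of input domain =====

-- B replaces A's memoized slice-keyed recursion by a bottom-up one-row index
-- DP that ignores the memo parameter (A's internal cache); equivalence is
-- about the RETURN value only: A fills the caller's memo dict, B does not.

-- ===== PORT A =====
-- the memo dict (key = (int, str)) as an association list; lookup = first match
def memoGet? : List (Int × String × Int) → Int → String → Option Int
  | [], _, _ => none
  | (k, t, v) :: rest, n, u => if k = n ∧ t = u then some v else memoGet? rest n u

def goA (s sub : List Char) (mem : List (Int × String × Int)) :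
    Int × List (Int × String × Int) :=
  if sub = [] then (1, mem)
  else if hs : s = [] then (0, mem)  -- hs is used by the termination proof
  else
    let kn : Int := (s.length : Int)
    let kt : String := String.mk sub
    match memoGet? mem kn kt with
    | some v => (v, mem)
    | none =>
      if s.getLast? = sub.getLast? then
        let p := goA s.dropLast sub.dropLast mem
        let q := goA s.dropLast sub p.2
        (p.1 + q.1, q.2 ++ [(kn, kt, p.1 + q.1)])
      else
        let q := goA s.dropLast sub mem
        (q.1, q.2 ++ [(kn, kt, q.1)])
termination_by s.length
decreasing_by
  all_goals
    (have h0 : 0 < s.length := List.length_pos_iff.mpr hs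
     simp only [List.length_dropLast]; omega)

def count_subseq (s : String) (subseq : String) (memo : Option (List (Int × String × Int))) : Int :=
  (goA s.toList subseq.toList (memo.getD [])).1

-- ===== PORT B =====
def count_subseq_alt (s : String) (subseq : String) (memo : Option (List (Int × String × Int))) : Int :=
  let csub := subseq.toList
  let m := csub.length
  let dp := s.toList.foldl
    (fun dp ch =>
      ((List.range' 1 m).reverse).foldl
        (fun dp (j : Nat) =>
          if ch = csub.getD (j - 1) ' ' then
            dp.set j (dp.getD j 0 + dp.getD (j - 1) 0)
          else dp) dp)
    (1 :: List.replicate m 0)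
  dp.getD m 0

-- ===== PRECONDITION & SPEC =====
-- Pre_ excludes calls whose memo argument is pre-seeded with an entry that
-- collides with A's internal cache keys (an int k with 1 ≤ k ≤ len(s) paired
-- with a nonempty prefix of subseq): the memo parameter is the recursion's
-- own working cache, and under such a foreign seed no particular return value
-- is specifiable — taking the seeded number on trust (A) and computing the
-- count from the strings (B) are both defensible, so nothing is claimed there.
def Pre_count_subseq (s : String) (subseq : String) (memo : Option (List (Int × String × Int))) : Prop :=
  ∀ e ∈ memo.getD [], ¬(1 ≤ e.1 ∧ e.1 ≤ (s.toList.length : Int) ∧ e.2.1 ≠ "" ∧ e.2.1.toList <+: subseq.toList)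
instance (s : String) (subseq : String) (memo : Option (List (Int × String × Int))) : Decidable (Pre_count_subseq s subseq memo) := by unfold Pre_count_subseq; infer_instance

def pvWitness_count_subseq : String × String × (Option (List (Int × String × Int))) :=
  ("abab", "ab", some [(7, "ab", 3), (2, "b", 5)])

def Spec_count_subseq (s : String) (subseq : String) (memo : Option (List (Int × String × Int))) (out : Int) : Prop := out = count_subseq_alt s subseq memo
instance (s : String) (subseq : String) (memo : Option (List (Int × String × Int))) (out : Int) : Decidable (Spec_count_subseq s subseq memo out) := by unfold Spec_count_subseq; infer_instance

-- ===== CLAIM (what is proved, stated in full; the proofs are below) =====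
def Claim_equal_count_subseq : Prop := ∀ (s : String) (subseq : String) (memo : Option (List (Int × String × Int))), Dom_count_subseq s subseq memo → Pre_count_subseq s subseq memo → Spec_count_subseq s subseq memo (count_subseq s subseq memo)

-- ===== LEMMAS AND PROOFS =====

-- the mathematical value A computes: pvF(i, j) = number of ways the first j
-- chars of csub occur as a subsequence of the first i chars of cs, overridden
-- by a memo entry for key (i, csub[:j]) when present
def pvF (cs csub : List Char) (mem : List (Int × String × Int)) : Nat → Nat → Int
  | _, 0 => 1
  | 0, _ + 1 => 0
  | i + 1, j + 1 =>
    match memoGet? mem ((i + 1 : Nat) : Int) (String.mk (csub.take (j + 1))) with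
    | some v => v
    | none =>
      if cs[i]? = csub[j]? then pvF cs csub mem i j + pvF cs csub mem i (j + 1)
      else pvF cs csub mem i (j + 1)

-- the pure DP value B computes
def pvFp (cs csub : List Char) : Nat → Nat → Int
  | _, 0 => 1
  | 0, _ + 1 => 0
  | i + 1, j + 1 =>
    if cs[i]? = csub[j]? then pvFp cs csub i j + pvFp cs csub i (j + 1)
    else pvFp cs csub i (j + 1)

-- every entry of `extra` whose key is a live key (i, csub[:j]) carries pvF i j
def pvGood (cs csub : List Char) (mem0 extra : List (Int × String × Int)) : Prop :=
  ∀ i j v, 1 ≤ i → i ≤ cs.length → 1 ≤ j → j ≤ csub.length →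
    memoGet? extra (i : Int) (String.mk (csub.take j)) = some v → v = pvF cs csub mem0 i j

theorem pvToList_mk (l : List Char) : (String.mk l).toList = l :=
  (String.ofList_eq.mp rfl).symm

theorem pvMk_inj {a b : List Char} (h : String.mk a = String.mk b) : a = b := by
  have := congrArg String.toList h; simpa [pvToList_mk] using this

theorem pvTake_ne_nil {l : List Char} {k : Nat} (h1 : 1 ≤ k) (h2 : k ≤ l.length) :
    l.take k ≠ [] := by
  have : (l.take k).length = k := by simp [List.length_take]; omega
  intro hnil; rw [hnil] at this; simp at this; omega

theorem pvDropLast_take {l : List Char} {i : Nat} (h : i + 1 ≤ l.length) :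
    (l.take (i + 1)).dropLast = l.take i := by
  rw [List.dropLast_eq_take, List.take_take]
  have : (l.take (i + 1)).length = i + 1 := by simp [List.length_take]; omega
  rw [this]
  congr 1
  omega

theorem pvGetLast?_take {l : List Char} {i : Nat} (h : i + 1 ≤ l.length) :
    (l.take (i + 1)).getLast? = l[i]? := by
  rw [List.getLast?_eq_getElem?]
  have hl : (l.take (i + 1)).length = i + 1 := by simp [List.length_take]; omega
  rw [hl]
  simp only [Nat.add_sub_cancel]
  exact List.getElem?_take_of_lt (by omega)

theorem goA_cons (s sub : List Char) (mem : List (Int × String × Int))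
    (hsub : sub ≠ []) (hs : s ≠ []) :
    goA s sub mem =
      match memoGet? mem (s.length : Int) (String.mk sub) with
      | some v => (v, mem)
      | none =>
        if s.getLast? = sub.getLast? then
          let p := goA s.dropLast sub.dropLast mem
          let q := goA s.dropLast sub p.2
          (p.1 + q.1, q.2 ++ [((s.length : Int), String.mk sub, p.1 + q.1)])
        else
          let q := goA s.dropLast sub mem
          (q.1, q.2 ++ [((s.length : Int), String.mk sub, q.1)]) := by
  rw [goA]
  simp [hsub, hs]

theorem memoGet?_append (a b : List (Int × String × Int)) (n : Int) (t : String) :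
    memoGet? (a ++ b) n t =
      (match memoGet? a n t with | some v => some v | none => memoGet? b n t) := by
  induction a with
  | nil => simp [memoGet?]
  | cons hd tl ih =>
    obtain ⟨k, u, v⟩ := hd
    by_cases h : k = n ∧ u = t <;> simp [memoGet?, h, ih]

theorem goA_spec (cs csub : List Char) (mem0 : List (Int × String × Int)) :
    ∀ i j extra, i ≤ cs.length → j ≤ csub.length → pvGood cs csub mem0 extra →
      (goA (cs.take i) (csub.take j) (mem0 ++ extra)).1 = pvF cs csub mem0 i j ∧
      ∃ extra', (goA (cs.take i) (csub.take j) (mem0 ++ extra)).2 = mem0 ++ extra' ∧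
        pvGood cs csub mem0 extra' := by
  intro i
  induction i with
  | zero =>
    intro j extra _ hj hg
    cases j with
    | zero => exact ⟨by simp [goA, pvF], extra, by simp [goA], hg⟩
    | succ j' =>
      have hsub := pvTake_ne_nil (l := csub) (k := j' + 1) (by omega) hj
      refine ⟨?_, extra, ?_, hg⟩ <;> rw [goA] <;> simp [hsub, pvF]
  | succ i' ih =>
    intro j extra hi hj hg
    cases j with
    | zero => exact ⟨by simp [goA, pvF], extra, by simp [goA], hg⟩
    | succ j' =>
      have hsub := pvTake_ne_nil (l := csub) (k := j' + 1) (by omega) hj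
      have hs := pvTake_ne_nil (l := cs) (k := i' + 1) (by omega) hi
      have hlen : (cs.take (i' + 1)).length = i' + 1 := by
        simp [List.length_take]; omega
      rw [goA_cons _ _ _ hsub hs, hlen, memoGet?_append]
      cases h0 : memoGet? mem0 ((i' + 1 : Nat) : Int) (String.mk (csub.take (j' + 1))) with
      | some v =>
        push_cast at h0
        refine ⟨?_, extra, ?_, hg⟩ <;> simp [pvF, h0]
      | none =>
        cases h1 : memoGet? extra ((i' + 1 : Nat) : Int) (String.mk (csub.take (j' + 1))) with
        | some v =>
          have hv : v = pvF cs csub mem0 (i' + 1) (j' + 1) :=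
            hg (i' + 1) (j' + 1) v (by omega) hi (by omega) hj h1
          push_cast at h0
          refine ⟨?_, extra, ?_, hg⟩ <;> simp [pvF, h0, hv]
        | none =>
          have hdrops : (cs.take (i' + 1)).dropLast = cs.take i' := pvDropLast_take hi
          have hlast : (cs.take (i' + 1)).getLast? = cs[i']? := pvGetLast?_take hi
          have hlastsub : (csub.take (j' + 1)).getLast? = csub[j']? := pvGetLast?_take hj
          have hdropsub : (csub.take (j' + 1)).dropLast = csub.take j' := pvDropLast_take hj
          simp only [hdrops, hlast, hlastsub, hdropsub]
          push_cast at h0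
          by_cases hc : cs[i']? = csub[j']?
          · -- last chars match: two recursive calls
            rw [if_pos hc]
            obtain ⟨hp1, e1, hp2, hg1⟩ := ih j' extra (by omega) (by omega) hg
            simp only [hp2]
            obtain ⟨hq1, e2, hq2, hg2⟩ := ih (j' + 1) e1 (by omega) hj hg1
            have hvf : pvF cs csub mem0 (i' + 1) (j' + 1)
                = pvF cs csub mem0 i' j' + pvF cs csub mem0 i' (j' + 1) := by
              simp [pvF, h0, hc]
            refine ⟨by simp [hp1, hq1, hvf], ?_⟩
            refine ⟨e2 ++ [(((i' + 1 : Nat) : Int), String.mk (csub.take (j' + 1)),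
                pvF cs csub mem0 i' j' + pvF cs csub mem0 i' (j' + 1))],
              by simp [hq2, hp1, hq1], ?_⟩
            intro a b w ha1 ha2 hb1 hb2 hw
            rw [memoGet?_append] at hw
            cases h2 : memoGet? e2 ((a : Nat) : Int) (String.mk (csub.take b)) with
            | some u =>
              rw [h2] at hw; simp at hw
              rw [← hw]; exact hg2 a b u ha1 ha2 hb1 hb2 h2
            | none =>
              rw [h2] at hw
              simp only [memoGet?] at hw
              by_cases hk : ((i' + 1 : Nat) : Int) = ((a : Nat) : Int) ∧
                  String.mk (csub.take (j' + 1)) = String.mk (csub.take b)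
              · have ha : a = i' + 1 := by exact_mod_cast hk.1.symm
                have hb : b = j' + 1 := by
                  have h3 := pvMk_inj hk.2
                  have hlb : (csub.take b).length = b := by simp [List.length_take]; omega
                  have hlj : (csub.take (j' + 1)).length = j' + 1 := by
                    simp [List.length_take]; omega
                  rw [← hlb, ← h3, hlj]
                rw [if_pos hk] at hw
                simp at hw
                subst ha; subst hb
                rw [← hw, hvf]
              · rw [if_neg hk] at hw
                simp at hw
          · -- last chars differ: one recursive call
            rw [if_neg hc]
            obtain ⟨hq1, e1, hq2, hg1⟩ := ih (j' + 1) extra (by omega) hj hg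
            have hvf : pvF cs csub mem0 (i' + 1) (j' + 1) = pvF cs csub mem0 i' (j' + 1) := by
              simp [pvF, h0, hc]
            refine ⟨by simp [hq1, hvf], ?_⟩
            refine ⟨e1 ++ [(((i' + 1 : Nat) : Int), String.mk (csub.take (j' + 1)),
                pvF cs csub mem0 i' (j' + 1))],
              by simp [hq2, hq1], ?_⟩
            intro a b w ha1 ha2 hb1 hb2 hw
            rw [memoGet?_append] at hw
            cases h2 : memoGet? e1 ((a : Nat) : Int) (String.mk (csub.take b)) with
            | some u =>
              rw [h2] at hw; simp at hw
              rw [← hw]; exact hg1 a b u ha1 ha2 hb1 hb2 h2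
            | none =>
              rw [h2] at hw
              simp only [memoGet?] at hw
              by_cases hk : ((i' + 1 : Nat) : Int) = ((a : Nat) : Int) ∧
                  String.mk (csub.take (j' + 1)) = String.mk (csub.take b)
              · have ha : a = i' + 1 := by exact_mod_cast hk.1.symm
                have hb : b = j' + 1 := by
                  have h3 := pvMk_inj hk.2
                  have hlb : (csub.take b).length = b := by simp [List.length_take]; omega
                  have hlj : (csub.take (j' + 1)).length = j' + 1 := by
                    simp [List.length_take]; omega
                  rw [← hlb, ← h3, hlj]
                rw [if_pos hk] at hw
                simp at hw
                subst ha; subst hb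
                rw [← hw, hvf]
              · rw [if_neg hk] at hw
                simp at hw

theorem count_subseq_eq_pvF (s subseq : String) (memo : Option (List (Int × String × Int))) :
    count_subseq s subseq memo =
      pvF s.toList subseq.toList (memo.getD []) s.toList.length subseq.toList.length := by
  have hgood : pvGood s.toList subseq.toList (memo.getD []) [] := by
    intro i j v _ _ _ _ h; simp [memoGet?] at h
  have h := (goA_spec s.toList subseq.toList (memo.getD [])
      s.toList.length subseq.toList.length [] le_rfl le_rfl hgood).1
  rw [List.take_length, List.take_length, List.append_nil] at h
  exact h

-- under Pre_, no live key (i, csub[:j]) is in the memo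
theorem pvPre_none (cs csub : List Char) (mem : List (Int × String × Int))
    (h : ∀ e ∈ mem, ¬(1 ≤ e.1 ∧ e.1 ≤ (cs.length : Int) ∧ e.2.1 ≠ "" ∧ e.2.1.toList <+: csub)) :
    ∀ i j, 1 ≤ i → i ≤ cs.length → 1 ≤ j → j ≤ csub.length →
      memoGet? mem (i : Int) (String.mk (csub.take j)) = none := by
  induction mem with
  | nil => intro i j _ _ _ _; simp [memoGet?]
  | cons hd tl ih =>
    intro i j hi1 hi2 hj1 hj2
    obtain ⟨k, t, v⟩ := hd
    have hhd := h (k, t, v) (by simp)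
    have htl : ∀ e ∈ tl, ¬(1 ≤ e.1 ∧ e.1 ≤ (cs.length : Int) ∧ e.2.1 ≠ "" ∧ e.2.1.toList <+: csub) := by
      intro e he; exact h e (by simp [he])
    by_cases hk : k = (i : Int) ∧ t = String.mk (csub.take j)
    · exfalso
      apply hhd
      obtain ⟨hk1, hk2⟩ := hk
      subst hk1; subst hk2
      dsimp only
      refine ⟨by exact_mod_cast hi1, by exact_mod_cast hi2, ?_, ?_⟩
      · intro ht
        have : (String.mk (csub.take j)).toList = [] := by rw [ht]; rfl
        rw [pvToList_mk] at this
        exact pvTake_ne_nil hj1 hj2 this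
      · rw [pvToList_mk]
        exact List.take_prefix j csub
    · simp only [memoGet?, if_neg hk]
      exact ih htl i j hi1 hi2 hj1 hj2

theorem pvF_eq_pvFp (cs csub : List Char) (mem : List (Int × String × Int))
    (hnone : ∀ i j, 1 ≤ i → i ≤ cs.length → 1 ≤ j → j ≤ csub.length →
      memoGet? mem (i : Int) (String.mk (csub.take j)) = none) :
    ∀ i j, i ≤ cs.length → j ≤ csub.length → pvF cs csub mem i j = pvFp cs csub i j := by
  intro i
  induction i with
  | zero =>
    intro j _ _
    cases j with
    | zero => simp [pvF, pvFp]
    | succ j' => simp [pvF, pvFp]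
  | succ i' ih =>
    intro j hi hj
    cases j with
    | zero => simp [pvF, pvFp]
    | succ j' =>
      have h0 := hnone (i' + 1) (j' + 1) (by omega) hi (by omega) hj
      push_cast at h0
      by_cases hc : cs[i']? = csub[j']? <;>
        simp [pvF, pvFp, h0, hc, ih j' (by omega) (by omega), ih (j' + 1) (by omega) hj]

-- ===== B side =====
def pvRowP (cs csub : List Char) (i : Nat) : List Int :=
  (List.range (csub.length + 1)).map (pvFp cs csub i)

-- dp state mid-way through the inner (reversed) loop: indices ≤ k still old
def pvMix (cs csub : List Char) (i k : Nat) : List Int :=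
  (List.range (csub.length + 1)).map
    (fun idx => if idx ≤ k then pvFp cs csub i idx else pvFp cs csub (i + 1) idx)

theorem pvMix_getD (cs csub : List Char) (i k j : Nat) (h : j ≤ csub.length) :
    (pvMix cs csub i k).getD j 0
      = if j ≤ k then pvFp cs csub i j else pvFp cs csub (i + 1) j := by
  have : (pvMix cs csub i k)[j]? =
      some (if j ≤ k then pvFp cs csub i j else pvFp cs csub (i + 1) j) := by
    simp [pvMix, List.getElem?_map, List.getElem?_range (by omega : j < csub.length + 1)]
  simp [List.getD, this]

theorem pvStep (cs csub : List Char) (i j : Nat) (hi : i < cs.length)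
    (hj1 : 1 ≤ j) (hj2 : j ≤ csub.length) :
    (if cs[i] = csub.getD (j - 1) ' ' then
        (pvMix cs csub i j).set j
          ((pvMix cs csub i j).getD j 0 + (pvMix cs csub i j).getD (j - 1) 0)
      else pvMix cs csub i j) = pvMix cs csub i (j - 1) := by
  obtain ⟨j', rfl⟩ : ∃ k, j = k + 1 := ⟨j - 1, by omega⟩
  have hj' : j' < csub.length := by omega
  have hcond : (cs[i] = csub.getD (j' + 1 - 1) ' ') = (cs[i]? = csub[j']?) := by
    simp only [Nat.add_sub_cancel]
    rw [List.getD_eq_getElem csub ' ' hj', List.getElem?_eq_getElem hi,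
      List.getElem?_eq_getElem hj']
    simp
  have hgj : (pvMix cs csub i (j' + 1)).getD (j' + 1) 0 = pvFp cs csub i (j' + 1) := by
    rw [pvMix_getD _ _ _ _ _ hj2]; simp
  have hgj1 : (pvMix cs csub i (j' + 1)).getD (j' + 1 - 1) 0 = pvFp cs csub i j' := by
    simp only [Nat.add_sub_cancel]
    rw [pvMix_getD _ _ _ _ _ (by omega)]; simp
  rw [hgj, hgj1]
  by_cases hc : cs[i]? = csub[j']?
  · rw [if_pos (hcond.mpr hc)]
    simp only [Nat.add_sub_cancel]
    apply List.ext_getElem?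
    intro idx
    by_cases hidx : idx ≤ csub.length
    · have hidxlt : idx < (pvMix cs csub i (j' + 1)).length := by simp [pvMix]; omega
      by_cases heq : idx = j' + 1
      · subst heq
        rw [List.getElem?_set_self hidxlt]
        have : (pvMix cs csub i j')[j' + 1]? = some (pvFp cs csub (i + 1) (j' + 1)) := by
          simp [pvMix, List.getElem?_map,
            List.getElem?_range (by omega : j' + 1 < csub.length + 1)]
        rw [this]
        have : pvFp cs csub (i + 1) (j' + 1) = pvFp cs csub i j' + pvFp cs csub i (j' + 1) := by
          simp [pvFp, hc]
        rw [this]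
        simp [Int.add_comm]
      · rw [List.getElem?_set_ne (by omega)]
        simp only [pvMix, List.getElem?_map,
          List.getElem?_range (by omega : idx < csub.length + 1), Option.map_some]
        have : (idx ≤ j' + 1) = (idx ≤ j') := by
          by_cases h5 : idx ≤ j' <;> simp [h5] <;> omega
        simp only [this]
    · have h1 : ((pvMix cs csub i (j' + 1)).set (j' + 1)
          (pvFp cs csub i (j' + 1) + pvFp cs csub i j'))[idx]? = none := by
        rw [List.getElem?_eq_none]; simp [pvMix]; omega
      have h2 : (pvMix cs csub i j')[idx]? = none := by
        rw [List.getElem?_eq_none]; simp [pvMix]; omega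
      rw [h1, h2]
  · rw [if_neg (fun a => hc (hcond.mp a))]
    simp only [Nat.add_sub_cancel]
    apply List.ext_getElem?
    intro idx
    by_cases hidx : idx ≤ csub.length
    · simp only [pvMix, List.getElem?_map,
        List.getElem?_range (by omega : idx < csub.length + 1), Option.map_some]
      by_cases heq : idx = j' + 1
      · subst heq
        have : pvFp cs csub (i + 1) (j' + 1) = pvFp cs csub i (j' + 1) := by
          simp [pvFp, hc]
        simp [this]
      · have : (idx ≤ j' + 1) = (idx ≤ j') := by
          by_cases h5 : idx ≤ j' <;> simp [h5] <;> omega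
        simp only [this]
    · have h1 : (pvMix cs csub i (j' + 1))[idx]? = none := by
        rw [List.getElem?_eq_none]; simp [pvMix]; omega
      have h2 : (pvMix cs csub i j')[idx]? = none := by
        rw [List.getElem?_eq_none]; simp [pvMix]; omega
      rw [h1, h2]

theorem pvInner (cs csub : List Char) (i : Nat) (hi : i < cs.length) :
    ∀ t k, k + t ≤ csub.length →
      ((List.range' (k + 1) t).reverse).foldl
        (fun dp (j : Nat) =>
          if cs[i] = csub.getD (j - 1) ' ' then
            dp.set j (dp.getD j 0 + dp.getD (j - 1) 0)
          else dp) (pvMix cs csub i (k + t)) = pvMix cs csub i k := by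
  intro t
  induction t with
  | zero => intro k _; simp
  | succ t' iht =>
    intro k hk
    rw [List.range'_1_concat, List.reverse_append]
    simp only [List.reverse_cons, List.reverse_nil, List.nil_append, List.singleton_append,
      List.foldl_cons]
    have hstep := pvStep cs csub i (k + 1 + t') hi (by omega) (by omega)
    have he1 : k + (t' + 1) = k + 1 + t' := by omega
    have he2 : k + 1 + t' - 1 = k + t' := by omega
    rw [he1, hstep, he2]
    exact iht k (by omega)

theorem pvMix_top (cs csub : List Char) (i : Nat) :
    pvMix cs csub i csub.length = pvRowP cs csub i := by
  apply List.map_congr_left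
  intro idx hidx
  have : idx ≤ csub.length := by
    have := List.mem_range.mp hidx; omega
  simp [this]

theorem pvMix_bot (cs csub : List Char) (i : Nat) :
    pvMix cs csub i 0 = pvRowP cs csub (i + 1) := by
  apply List.map_congr_left
  intro idx _
  cases idx with
  | zero => simp [pvFp]
  | succ k => simp

theorem pvRowP_zero (cs csub : List Char) :
    (1 : Int) :: List.replicate csub.length 0 = pvRowP cs csub 0 := by
  apply List.ext_getElem?
  intro k
  cases k with
  | zero => simp [pvRowP, pvFp]
  | succ j =>
    by_cases hj : j < csub.length
    · simp [pvRowP, hj, pvFp]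
    · have h1 : ((1 : Int) :: List.replicate csub.length 0).length ≤ j + 1 := by simp; omega
      have h2 : (pvRowP cs csub 0).length ≤ j + 1 := by simp [pvRowP]; omega
      rw [List.getElem?_eq_none h1, List.getElem?_eq_none h2]

theorem pvOuter (cs csub : List Char) :
    ∀ i, i ≤ cs.length →
      (cs.take i).foldl
        (fun dp ch =>
          ((List.range' 1 csub.length).reverse).foldl
            (fun dp (j : Nat) =>
              if ch = csub.getD (j - 1) ' ' then
                dp.set j (dp.getD j 0 + dp.getD (j - 1) 0)
              else dp) dp)
        ((1 : Int) :: List.replicate csub.length 0) = pvRowP cs csub i := by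
  intro i
  induction i with
  | zero => simpa using pvRowP_zero cs csub
  | succ i' ih =>
    intro hi
    have hi' : i' < cs.length := by omega
    rw [List.take_succ, List.getElem?_eq_getElem hi']
    simp only [Option.toList_some, List.foldl_append, List.foldl_cons, List.foldl_nil]
    rw [ih (by omega)]
    have := pvInner cs csub i' hi' csub.length 0 (by omega)
    simp only [Nat.zero_add] at this
    rw [← pvMix_top cs csub i', this, pvMix_bot]

theorem pvRowP_getD (cs csub : List Char) (i : Nat) :
    (pvRowP cs csub i).getD csub.length 0 = pvFp cs csub i csub.length := by
  have : (pvRowP cs csub i)[csub.length]? = some (pvFp cs csub i csub.length) := by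
    simp [pvRowP, List.getElem?_map,
      List.getElem?_range (by omega : csub.length < csub.length + 1)]
  simp [List.getD, this]

theorem count_subseq_alt_eq_pvFp (s subseq : String) (memo : Option (List (Int × String × Int))) :
    count_subseq_alt s subseq memo = pvFp s.toList subseq.toList s.toList.length subseq.toList.length := by
  unfold count_subseq_alt
  dsimp only
  have h := pvOuter s.toList subseq.toList s.toList.length le_rfl
  rw [List.take_length] at h
  rw [h]
  exact pvRowP_getD _ _ _

-- ===== VERDICT (by name: the statement is the Claim_ definition above) =====
theorem count_subseq_spec : Claim_equal_count_subseq := by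
  intro s subseq memo _ hpre
  unfold Spec_count_subseq
  rw [count_subseq_eq_pvF, count_subseq_alt_eq_pvFp]
  exact pvF_eq_pvFp s.toList subseq.toList (memo.getD [])
    (pvPre_none s.toList subseq.toList (memo.getD []) hpre) _ _ le_rfl le_rfl
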